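-- pv_equiv track=rewrite | github.com/geenoperumal-hub/Athena | agents/skeptic_agent.py | _generate_financial_recommendations
-- ===== SOURCE A (Python) =====
-- from typing import Dict, Any, List
--
-- def _generate_financial_recommendations(risks: List[str]) -> List[str]:
--     """Generate financial risk mitigation recommendations"""
--     recommendations = []
--
--     for risk in risks:
--         if "runway" in risk.lower():
--             recommendations.append("Consider raising bridge funding or reducing burn rate")
--         elif "unit economics" in risk.lower():
--             recommendations.append("Focus on improving customer acquisition efficiency")
--         elif "churn" in risk.lower():
--             recommendations.append("Implement customer success initiatives to reduce churn")
--         elif "revenue" in risk.lower():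
--             recommendations.append("Prioritize revenue generation and customer validation")
--
--     return recommendations
-- ===== SOURCE B (Python) =====
-- from typing import Dict, Any, List
--
-- _RULES = [
--     ("runway", "Consider raising bridge funding or reducing burn rate"),
--     ("unit economics", "Focus on improving customer acquisition efficiency"),
--     ("churn", "Implement customer success initiatives to reduce churn"),
--     ("revenue", "Prioritize revenue generation and customer validation"),
-- ]
--
--
-- def _generate_financial_recommendations(risks: List[str]) -> List[str]:
--     # Rule-major staged passes: the outer loop runs over the rules (in
--     # priority order), each pass filling still-empty slots of a per-risk
--     # vector; at the end the vector is compacted.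
--     lowered = [r.lower() for r in risks]
--     slots = [None] * len(risks)
--     for keyword, rec in _RULES:
--         slots = [rec if s is None and keyword in rl else s
--                  for s, rl in zip(slots, lowered)]
--     return [s for s in slots if s is not None]
-- ===== Notes on version B (the rewrite author's own statement) =====
-- stated objective: alternative
-- what changed: Flips the loop nesting: instead of a per-risk elif chain, B makes one staged pass per rule (rule-major outer loop) that fills still-empty entries of a per-risk slots vector, then compacts the vector; priority comes from the pass order.
import Mathlib
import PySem

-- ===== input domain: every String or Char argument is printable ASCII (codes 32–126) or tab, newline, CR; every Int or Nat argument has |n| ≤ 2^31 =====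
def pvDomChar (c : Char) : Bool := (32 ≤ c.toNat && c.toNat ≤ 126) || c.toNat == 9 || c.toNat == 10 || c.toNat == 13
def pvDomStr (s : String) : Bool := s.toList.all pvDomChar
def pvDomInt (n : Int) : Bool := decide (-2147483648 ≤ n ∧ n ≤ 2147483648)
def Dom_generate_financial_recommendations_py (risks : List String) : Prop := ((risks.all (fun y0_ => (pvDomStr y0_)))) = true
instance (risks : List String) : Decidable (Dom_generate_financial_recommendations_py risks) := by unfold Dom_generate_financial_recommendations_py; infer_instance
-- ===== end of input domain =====

-- B flips the loop nesting (one staged pass per rule over a slots vector, then compaction) instead of A's per-risk elif chain; same cost.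

-- ===== PORT A =====
-- Port of A: the for-loop with the elif chain, as a foldl over the same accumulator.
def generate_financial_recommendations_py (risks : List String) : List String :=
  risks.foldl (fun recommendations risk =>
    if PySem.Str.isIn "runway" (PySem.Str.lower risk) then
      recommendations ++ ["Consider raising bridge funding or reducing burn rate"]
    else if PySem.Str.isIn "unit economics" (PySem.Str.lower risk) then
      recommendations ++ ["Focus on improving customer acquisition efficiency"]
    else if PySem.Str.isIn "churn" (PySem.Str.lower risk) then
      recommendations ++ ["Implement customer success initiatives to reduce churn"]
    else if PySem.Str.isIn "revenue" (PySem.Str.lower risk) then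
      recommendations ++ ["Prioritize revenue generation and customer validation"]
    else recommendations) []

-- ===== PORT B =====
-- Port of B: rule table; one zip-pass per rule filling empty slots; final compaction.
def pvRules : List (String × String) :=
  [("runway", "Consider raising bridge funding or reducing burn rate"),
   ("unit economics", "Focus on improving customer acquisition efficiency"),
   ("churn", "Implement customer success initiatives to reduce churn"),
   ("revenue", "Prioritize revenue generation and customer validation")]

-- the body of B's per-pass comprehension: fill a still-empty slot on a keyword hit
def pvStep (p : String × String) (s : Option String) (rl : String) : Option String :=
  if s = none ∧ PySem.Str.isIn p.1 rl then some p.2 else s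

def generate_financial_recommendations_py_alt (risks : List String) : List String :=
  let lowered := risks.map PySem.Str.lower
  let slots0 : List (Option String) := List.replicate risks.length none
  let slots := pvRules.foldl (fun slots p => List.zipWith (pvStep p) slots lowered) slots0
  slots.filterMap id
-- ===== PRECONDITION & SPEC =====
def Spec_generate_financial_recommendations_py (risks : List String) (out : List String) : Prop := out = generate_financial_recommendations_py_alt risks
instance (risks : List String) (out : List String) : Decidable (Spec_generate_financial_recommendations_py risks out) := by unfold Spec_generate_financial_recommendations_py; infer_instance

-- ===== CLAIM (what is proved, stated in full; the proofs are below) =====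
def Claim_equal_generate_financial_recommendations_py : Prop := ∀ (risks : List String), Dom_generate_financial_recommendations_py risks → Spec_generate_financial_recommendations_py risks (generate_financial_recommendations_py risks)

-- ===== LEMMAS AND PROOFS =====

-- The per-element result of B's staged passes, starting from an empty slot.
def pvSlot (rl : String) : Option String :=
  pvRules.foldl (fun s p => pvStep p s rl) none

-- A fold of zip-passes distributes element-wise over cons.
theorem pv_fold_zip (rules : List (String × String)) (s : Option String)
    (ss : List (Option String)) (x : String) (xs : List String) :
    rules.foldl (fun slots p => List.zipWith (pvStep p) slots (x :: xs)) (s :: ss)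
    = (rules.foldl (fun a p => pvStep p a x) s)
      :: rules.foldl (fun slots p => List.zipWith (pvStep p) slots xs) ss := by
  induction rules generalizing s ss with
  | nil => simp
  | cons p ps ih => simp [List.zipWith, ih]

theorem pv_alt_nil : generate_financial_recommendations_py_alt [] = [] := rfl

-- B's staged zip-passes process each risk independently: they distribute over cons.
theorem pv_alt_cons (r : String) (rs : List String) :
    generate_financial_recommendations_py_alt (r :: rs)
    = (pvSlot (PySem.Str.lower r)).toList ++ generate_financial_recommendations_py_alt rs := by
  unfold generate_financial_recommendations_py_alt pvSlot
  simp only [List.map_cons, List.length_cons, List.replicate_succ, pv_fold_zip,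
    List.filterMap_cons]
  cases pvRules.foldl (fun a p => pvStep p a (PySem.Str.lower r)) none <;> simp

-- One step of A's loop appends exactly B's per-risk slot content.
theorem pv_step (acc : List String) (risk : String) :
    (if PySem.Str.isIn "runway" (PySem.Str.lower risk) then
      acc ++ ["Consider raising bridge funding or reducing burn rate"]
    else if PySem.Str.isIn "unit economics" (PySem.Str.lower risk) then
      acc ++ ["Focus on improving customer acquisition efficiency"]
    else if PySem.Str.isIn "churn" (PySem.Str.lower risk) then
      acc ++ ["Implement customer success initiatives to reduce churn"]
    else if PySem.Str.isIn "revenue" (PySem.Str.lower risk) then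
      acc ++ ["Prioritize revenue generation and customer validation"]
    else acc) = acc ++ (pvSlot (PySem.Str.lower risk)).toList := by
  unfold pvSlot pvRules pvStep
  simp only [List.foldl]
  split_ifs with h1 h2 h3 h4 <;> simp_all

theorem pv_main (risks : List String) (acc : List String) :
    risks.foldl (fun recommendations risk =>
      if PySem.Str.isIn "runway" (PySem.Str.lower risk) then
        recommendations ++ ["Consider raising bridge funding or reducing burn rate"]
      else if PySem.Str.isIn "unit economics" (PySem.Str.lower risk) then
        recommendations ++ ["Focus on improving customer acquisition efficiency"]
      else if PySem.Str.isIn "churn" (PySem.Str.lower risk) then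
        recommendations ++ ["Implement customer success initiatives to reduce churn"]
      else if PySem.Str.isIn "revenue" (PySem.Str.lower risk) then
        recommendations ++ ["Prioritize revenue generation and customer validation"]
      else recommendations) acc
    = acc ++ generate_financial_recommendations_py_alt risks := by
  induction risks generalizing acc with
  | nil => simp [pv_alt_nil]
  | cons r rs ih =>
    rw [List.foldl_cons, pv_step acc r, ih, pv_alt_cons]
    simp

-- ===== VERDICT (by name: the statement is the Claim_ definition above) =====
theorem generate_financial_recommendations_py_spec : Claim_equal_generate_financial_recommendations_py := by
  intro risks _
  unfold Spec_generate_financial_recommendations_py generate_financial_recommendations_py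
  simpa using pv_main risks []
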